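-- pv_equiv track=rewrite | github.com/taddeus/advent-of-code | 2024/21_keypad.py | paths_between
-- ===== SOURCE A (Python) =====
-- def walk(keypad, x, y, path):
--     for direction in path:
--         neighbors = (x - 1, y), (x + 1, y), (x, y - 1), (x, y + 1)
--         x, y = neighbors['<>^v'.index(direction)]
--         yield keypad[y][x]
--
-- def paths_between(keypad, start, end):
--     x1, y1 = next((x, y) for y, row in enumerate(keypad)
--                          for x, key in enumerate(row) if key == start)
--     x2, y2 = next((x, y) for y, row in enumerate(keypad)
--                          for x, key in enumerate(row) if key == end)
--     hor = '<>'[x2 > x1] * abs(x2 - x1)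
--     ver = '^v'[y2 > y1] * abs(y2 - y1)
--     return tuple(path + 'A' for path in {hor + ver, ver + hor}
--                  if ' ' not in walk(keypad, x1, y1, path))
-- ===== SOURCE B (Python) =====
-- def paths_between(keypad, start, end):
--     def locate(key):
--         for y, row in enumerate(keypad):
--             if key in row:
--                 return row.index(key), y
--         return None
--
--     x1, y1 = locate(start)
--     x2, y2 = locate(end)
--     gaps = [(x, y) for y, row in enumerate(keypad)
--                    for x, key in enumerate(row) if key == ' ']
--     hor = ('>' if x2 > x1 else '<') * abs(x2 - x1)
--     ver = ('v' if y2 > y1 else '^') * abs(y2 - y1)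
--     xlo, xhi = min(x1, x2), max(x1, x2)
--     ylo, yhi = min(y1, y2), max(y1, y2)
--
--     def clear(row_y, col_x):
--         # the L-path with legs on row row_y and column col_x avoids every gap
--         # (the start cell itself is never checked)
--         return not any(((gy == row_y and xlo <= gx <= xhi) or
--                         (gx == col_x and ylo <= gy <= yhi)) and (gx, gy) != (x1, y1)
--                        for gx, gy in gaps)
--
--     out = []
--     if clear(y1, x2):
--         out.append(hor + ver + 'A')
--     if x1 != x2 and y1 != y2 and clear(y2, x1):
--         out.append(ver + hor + 'A')
--     return tuple(out)
-- ===== Notes on version B (the rewrite author's own statement) =====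
-- stated objective: alternative
-- what changed: B never replays the moves: it collects the gap coordinates in one grid scan and decides each candidate's validity by a closed-form geometric test of whether a gap lies on the corresponding L-shaped path, instead of building direction strings and walking them cell by cell with a generator.
-- outside the precondition, e.g. on paths_between([['c', 'c', ' ', 'a'], ['b', ' '], []], 'b', 'a'): A returns (), B returns ()
import Mathlib
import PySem

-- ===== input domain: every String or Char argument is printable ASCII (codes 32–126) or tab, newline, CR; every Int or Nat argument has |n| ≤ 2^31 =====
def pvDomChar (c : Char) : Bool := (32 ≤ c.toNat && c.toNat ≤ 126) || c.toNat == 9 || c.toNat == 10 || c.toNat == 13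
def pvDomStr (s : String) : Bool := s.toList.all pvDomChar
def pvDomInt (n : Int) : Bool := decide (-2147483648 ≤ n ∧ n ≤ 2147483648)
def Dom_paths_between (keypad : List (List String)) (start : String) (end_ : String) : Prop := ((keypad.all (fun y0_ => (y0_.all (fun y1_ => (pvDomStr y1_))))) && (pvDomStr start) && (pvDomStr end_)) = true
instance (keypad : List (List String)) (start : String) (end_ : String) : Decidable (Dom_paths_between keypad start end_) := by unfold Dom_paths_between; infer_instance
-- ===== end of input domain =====

-- B replaces A's move-replaying walk generator by one grid scan collecting the gap
-- coordinates plus a closed-form geometric test of whether a gap lies on each L-path.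
-- ===== PORT A =====

-- next((x, y) for y, row in enumerate(keypad) for x, key in enumerate(row) if key == start)
def pvFindRow (row : List String) (k : String) (x : Int) : Option Int :=
  match row with
  | [] => none
  | c :: r => if c = k then some x else pvFindRow r k (x + 1)

def pvFind (keypad : List (List String)) (k : String) (y : Int) : Option (Int × Int) :=
  match keypad with
  | [] => none
  | row :: rest =>
    match pvFindRow row k 0 with
    | some x => some (x, y)
    | none => pvFind rest k (y + 1)

-- keypad[y][x]; Python raises IndexError out of range (excluded by Pre_), the port totalises with ""
def pvCell (keypad : List (List String)) (x y : Int) : String :=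
  ((PySem.List.pyGet? ((PySem.List.pyGet? keypad y).getD []) x)).getD ""

-- neighbors['<>^v'.index(direction)]  (directions other than '<>^v' never occur in the paths built below)
def pvStep (x y : Int) (d : Char) : Int × Int :=
  if d = '<' then (x - 1, y)
  else if d = '>' then (x + 1, y)
  else if d = '^' then (x, y - 1)
  else (x, y + 1)

-- the generator walk(keypad, x, y, path), collected into the list of yielded cells
def pvWalk (keypad : List (List String)) (x y : Int) : List Char → List String
  | [] => []
  | d :: rest =>
    pvCell keypad (pvStep x y d).1 (pvStep x y d).2 ::
      pvWalk keypad (pvStep x y d).1 (pvStep x y d).2 rest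

def paths_between (keypad : List (List String)) (start : String) (end_ : String) : List String :=
  match pvFind keypad start 0, pvFind keypad end_ 0 with
  | some (x1, y1), some (x2, y2) =>
    let hor := String.ofList (List.replicate (x2 - x1).natAbs (if x2 > x1 then '>' else '<'))
    let ver := String.ofList (List.replicate (y2 - y1).natAbs (if y2 > y1 then 'v' else '^'))
    ((PySem.Set.ofList [hor ++ ver, ver ++ hor]).filter
        (fun p => !((pvWalk keypad x1 y1 p.toList).contains " "))).map (fun p => p ++ "A")
  | _, _ => []  -- Python A raises StopIteration here; outside Pre_

-- ===== PORT B =====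

-- locate(key): first row containing key, row.index(key)
def pvLocate (keypad : List (List String)) (key : String) (y : Int) : Option (Int × Int) :=
  match keypad with
  | [] => none
  | row :: rest =>
    if row.contains key then (PySem.List.index? row key).map (fun i => ((i : Int), y))
    else pvLocate rest key (y + 1)

-- [(x, y) for y, row in enumerate(keypad) for x, key in enumerate(row) if key == ' ']
def pvGaps (keypad : List (List String)) : List (Int × Int) :=
  (PySem.List.enumerate keypad).flatMap (fun yr =>
    (PySem.List.enumerate yr.2).filterMap (fun xk => if xk.2 = " " then some (xk.1, yr.1) else none))

-- the body of clear's any(...): gap g lies on the L-path with legs on row rowY / column colX, g ≠ start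
def pvOnL (x1 y1 xlo xhi ylo yhi rowY colX : Int) (g : Int × Int) : Bool :=
  decide (((g.2 = rowY ∧ xlo ≤ g.1 ∧ g.1 ≤ xhi) ∨ (g.1 = colX ∧ ylo ≤ g.2 ∧ g.2 ≤ yhi))
          ∧ ¬(g = (x1, y1)))

def paths_between_alt (keypad : List (List String)) (start : String) (end_ : String) : List String :=
  match pvLocate keypad start 0 with
  | none => []  -- Python B raises TypeError unpacking None; outside Pre_
  | some (x1, y1) =>
    match pvLocate keypad end_ 0 with
    | none => []
    | some (x2, y2) =>
      let gaps := pvGaps keypad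
      let hor := String.ofList (List.replicate (x2 - x1).natAbs (if x2 > x1 then '>' else '<'))
      let ver := String.ofList (List.replicate (y2 - y1).natAbs (if y2 > y1 then 'v' else '^'))
      (if !(gaps.any (pvOnL x1 y1 (min x1 x2) (max x1 x2) (min y1 y2) (max y1 y2) y1 x2))
       then [hor ++ ver ++ "A"] else []) ++
      (if x1 ≠ x2 ∧ y1 ≠ y2 ∧
          !(gaps.any (pvOnL x1 y1 (min x1 x2) (max x1 x2) (min y1 y2) (max y1 y2) y2 x1)) = true
       then [ver ++ hor ++ "A"] else [])

-- ===== PRECONDITION & SPEC =====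
def pvRowAt (keypad : List (List String)) (j : Nat) : List String := keypad[j]?.getD []

-- key first occurs in keypad at row j, column i
def pvFirstAt (keypad : List (List String)) (key : String) (j i : Nat) : Prop :=
  j < keypad.length ∧ i < (pvRowAt keypad j).length ∧ (pvRowAt keypad j)[i]?.getD "" = key ∧
  (∀ j' ∈ List.range j, key ∉ pvRowAt keypad j') ∧
  (∀ i' ∈ List.range i, (pvRowAt keypad j)[i']?.getD "" ≠ key)

-- Pre_ excludes inputs where a key is absent (A raises StopIteration) and inputs where a candidate
-- walk would step outside the (possibly ragged) grid: there Python A raises IndexError, except when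
-- a gap cell appears in the walk before the out-of-range step (A then returns; see the cited example).
def Pre_paths_between (keypad : List (List String)) (start : String) (end_ : String) : Prop :=
  ∃ j1 ∈ List.range keypad.length, ∃ i1 ∈ List.range (pvRowAt keypad j1).length,
  ∃ j2 ∈ List.range keypad.length, ∃ i2 ∈ List.range (pvRowAt keypad j2).length,
    pvFirstAt keypad start j1 i1 ∧ pvFirstAt keypad end_ j2 i2 ∧
    ∀ j ∈ List.range keypad.length,
      min j1 j2 ≤ j ∧ j ≤ max j1 j2 → max i1 i2 < (pvRowAt keypad j).length
instance (keypad : List (List String)) (start : String) (end_ : String) : Decidable (Pre_paths_between keypad start end_) := by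
  unfold Pre_paths_between
  letI : ∀ (key : String) (j i : Nat), Decidable (pvFirstAt keypad key j i) := fun key j i => by
    unfold pvFirstAt
    infer_instance
  infer_instance

def pvWitness_paths_between : List (List String) × String × String := ([["7", "8"], [" ", "0"]], "7", "0")

def Spec_paths_between (keypad : List (List String)) (start : String) (end_ : String) (out : List String) : Prop := out = paths_between_alt keypad start end_
instance (keypad : List (List String)) (start : String) (end_ : String) (out : List String) : Decidable (Spec_paths_between keypad start end_ out) := by unfold Spec_paths_between; infer_instance

-- ===== CLAIM (what is proved, stated in full; the proofs are below) =====
def Claim_equal_paths_between : Prop := ∀ (keypad : List (List String)) (start : String) (end_ : String), Dom_paths_between keypad start end_ → Pre_paths_between keypad start end_ → Spec_paths_between keypad start end_ (paths_between keypad start end_)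

-- ===== LEMMAS AND PROOFS =====

theorem pvFindRow_eq (row : List String) (k : String) (x : Int) :
    pvFindRow row k x = (PySem.List.index? row k).map (fun i => (i : Int) + x) := by
  induction row generalizing x with
  | nil => simp [pvFindRow]
  | cons c r ih =>
    by_cases hc : c = k
    · subst hc
      rw [pvFindRow, if_pos rfl, PySem.List.index?_cons_self]
      simp
    · rw [pvFindRow, if_neg hc, PySem.List.index?_cons_of_ne r hc, ih]
      cases PySem.List.index? r k
      · simp
      · simp
        omega

theorem pvFind_eq_pvLocate (keypad : List (List String)) (k : String) (y : Int) :
    pvFind keypad k y = pvLocate keypad k y := by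
  induction keypad generalizing y with
  | nil => rfl
  | cons row rest ih =>
    rw [pvFind, pvLocate, pvFindRow_eq]
    by_cases hc : row.contains k
    · have hmem : k ∈ row := by simpa using hc
      rw [if_pos hc]
      rcases Option.isSome_iff_exists.mp ((PySem.List.index?_isSome_iff row k).mpr hmem) with ⟨i, hi⟩
      rw [hi]
      simp
    · have hmem : k ∉ row := by simpa using hc
      rw [if_neg hc, (PySem.List.index?_eq_none_iff row k).mpr hmem]
      exact ih (y + 1)

theorem pvStep_eq (x y : Int) (d : Char) :
    pvStep x y d = (x + (pvStep 0 0 d).1, y + (pvStep 0 0 d).2) := by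
  unfold pvStep
  by_cases h1 : d = '<' <;> by_cases h2 : d = '>' <;> by_cases h3 : d = '^' <;>
    simp [h1, h2, h3] <;> omega

theorem pvWalk_replicate (k : List (List String)) (x y : Int) (n : Nat) (d : Char) :
    pvWalk k x y (List.replicate n d) =
      (List.range n).map (fun i : Nat =>
        pvCell k (x + ((i : Int) + 1) * (pvStep 0 0 d).1) (y + ((i : Int) + 1) * (pvStep 0 0 d).2)) := by
  induction n generalizing x y with
  | zero => simp [pvWalk]
  | succ n ih =>
    rw [List.replicate_succ, pvWalk, pvStep_eq, ih, List.range_succ_eq_map]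
    simp only [List.map_cons, List.map_map]
    refine List.cons_eq_cons.mpr ⟨?_, ?_⟩
    · congr 1 <;> push_cast <;> ring
    · apply List.map_congr_left
      intro i hi
      simp only [Function.comp]
      congr 1 <;> push_cast <;> ring

theorem pvWalk_append (k : List (List String)) (x y : Int) (p q : List Char) :
    pvWalk k x y (p ++ q) =
      pvWalk k x y p ++
        pvWalk k (p.foldl (fun s d => pvStep s.1 s.2 d) (x, y)).1
                 (p.foldl (fun s d => pvStep s.1 s.2 d) (x, y)).2 q := by
  induction p generalizing x y with
  | nil => simp [pvWalk]
  | cons d p ih => simp [pvWalk, List.foldl_cons, ih]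

theorem pvDest_replicate (x y : Int) (n : Nat) (d : Char) :
    (List.replicate n d).foldl (fun s e => pvStep s.1 s.2 e) (x, y) =
      (x + (n : Int) * (pvStep 0 0 d).1, y + (n : Int) * (pvStep 0 0 d).2) := by
  induction n generalizing x y with
  | zero => simp
  | succ n ih =>
    rw [List.replicate_succ, List.foldl_cons, pvStep_eq, ih]
    refine Prod.ext ?_ ?_ <;> push_cast <;> ring

theorem mem_pvGaps (k : List (List String)) (g : Int × Int) :
    g ∈ pvGaps k ↔ ∃ (j i : Nat) (hj : j < k.length) (hi : i < k[j].length),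
      k[j][i] = " " ∧ g = ((i : Int), (j : Int)) := by
  unfold pvGaps
  rw [List.mem_flatMap]
  constructor
  · rintro ⟨yr, hyr, hg⟩
    rw [PySem.List.mem_enumerate_iff] at hyr
    obtain ⟨j, hj, rfl⟩ := hyr
    rw [List.mem_filterMap] at hg
    obtain ⟨xk, hxk, hsome⟩ := hg
    rw [PySem.List.mem_enumerate_iff] at hxk
    obtain ⟨i, hi, rfl⟩ := hxk
    by_cases hsp : k[j][i] = " "
    · refine ⟨j, i, hj, hi, hsp, ?_⟩
      rw [if_pos hsp] at hsome
      simp only [Option.some_inj] at hsome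
      subst hsome
      simp
    · rw [if_neg hsp] at hsome
      simp at hsome
  · rintro ⟨j, i, hj, hi, hsp, rfl⟩
    refine ⟨((j : Int), k[j]), ?_, ?_⟩
    · rw [PySem.List.mem_enumerate_iff]
      exact ⟨j, hj, by simp⟩
    · rw [List.mem_filterMap]
      refine ⟨((i : Int), k[j][i]), ?_, ?_⟩
      · rw [PySem.List.mem_enumerate_iff]
        exact ⟨i, hi, by simp⟩
      · rw [if_pos hsp]

-- the central geometric lemma: cells strictly after the start along the two legs of an L-path
-- are exactly the closed L minus the start point (C is the cell predicate)
theorem pvLgeom (C : Int → Int → Prop) (a1 b1 a2 b2 : Int) :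
    ((∃ i : Nat, i < (a2 - a1).natAbs ∧ C (a1 + ((i : Int) + 1) * (if a2 > a1 then 1 else -1)) b1) ∨
     (∃ j : Nat, j < (b2 - b1).natAbs ∧ C a2 (b1 + ((j : Int) + 1) * (if b2 > b1 then 1 else -1))))
    ↔ (∃ a b : Int,
        ((b = b1 ∧ min a1 a2 ≤ a ∧ a ≤ max a1 a2) ∨ (a = a2 ∧ min b1 b2 ≤ b ∧ b ≤ max b1 b2)) ∧
        ¬(a = a1 ∧ b = b1) ∧ C a b) := by
  constructor
  · rintro (⟨i, hi, hC⟩ | ⟨j, hj, hC⟩)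
    · refine ⟨a1 + ((i : Int) + 1) * (if a2 > a1 then 1 else -1), b1, ?_, ?_, hC⟩
      · left
        refine ⟨rfl, ?_, ?_⟩ <;> by_cases h : a2 > a1 <;> simp only [h, if_true, if_false] <;> omega
      · rintro ⟨h1, -⟩
        by_cases h : a2 > a1 <;> simp only [h, if_true, if_false] at h1 <;> omega
    · refine ⟨a2, b1 + ((j : Int) + 1) * (if b2 > b1 then 1 else -1), ?_, ?_, hC⟩
      · right
        refine ⟨rfl, ?_, ?_⟩ <;> by_cases h : b2 > b1 <;> simp only [h, if_true, if_false] <;> omega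
      · rintro ⟨-, h2⟩
        by_cases h : b2 > b1 <;> simp only [h, if_true, if_false] at h2 <;> omega
  · rintro ⟨a, b, hgeom, hne, hC⟩
    rcases hgeom with ⟨rfl, hlo, hhi⟩ | ⟨rfl, hlo, hhi⟩
    · have ha : a ≠ a1 := fun h => hne ⟨h, rfl⟩
      left
      by_cases h : a2 > a1
      · refine ⟨(a - a1 - 1).toNat, by omega, ?_⟩
        have heq : a1 + (((a - a1 - 1).toNat : Int) + 1) * (if a2 > a1 then 1 else -1) = a := by
          simp only [h, if_true]
          omega
        rw [heq]
        exact hC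
      · refine ⟨(a1 - a - 1).toNat, by omega, ?_⟩
        have heq : a1 + (((a1 - a - 1).toNat : Int) + 1) * (if a2 > a1 then 1 else -1) = a := by
          simp only [h, if_false]
          omega
        rw [heq]
        exact hC
    · by_cases hb : b = b1
      · subst hb
        have ha : a ≠ a1 := fun h => hne ⟨h, rfl⟩
        left
        by_cases h : a > a1
        · refine ⟨(a - a1 - 1).toNat, by omega, ?_⟩
          have heq : a1 + (((a - a1 - 1).toNat : Int) + 1) * (if a > a1 then 1 else -1) = a := by
            simp only [h, if_true]
            omega
          rw [heq]
          exact hC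
        · refine ⟨(a1 - a - 1).toNat, by omega, ?_⟩
          have heq : a1 + (((a1 - a - 1).toNat : Int) + 1) * (if a > a1 then 1 else -1) = a := by
            simp only [h, if_false]
            omega
          rw [heq]
          exact hC
      · right
        by_cases h : b2 > b1
        · refine ⟨(b - b1 - 1).toNat, by omega, ?_⟩
          have heq : b1 + (((b - b1 - 1).toNat : Int) + 1) * (if b2 > b1 then 1 else -1) = b := by
            simp only [h, if_true]
            omega
          rw [heq]
          exact hC
        · refine ⟨(b1 - b - 1).toNat, by omega, ?_⟩
          have heq : b1 + (((b1 - b - 1).toNat : Int) + 1) * (if b2 > b1 then 1 else -1) = b := by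
            simp only [h, if_false]
            omega
          rw [heq]
          exact hC

theorem index?_first (row : List String) (key : String) : ∀ (i : Nat), i < row.length →
    row[i]?.getD "" = key → (∀ i' ∈ List.range i, row[i']?.getD "" ≠ key) →
    PySem.List.index? row key = some i := by
  induction row with
  | nil => intro i hi _ _; simp at hi
  | cons c r ih =>
    intro i hi hkey hmin
    cases i with
    | zero =>
      simp only [List.getElem?_cons_zero, Option.getD_some] at hkey
      subst hkey
      exact PySem.List.index?_cons_self c r
    | succ i' =>
      have hc : c ≠ key := by
        have := hmin 0 (by simp)
        simpa using this
      rw [PySem.List.index?_cons_of_ne r hc,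
        ih i' (by simpa using hi) (by simpa using hkey) (fun i'' hi'' => by
          have := hmin (i'' + 1) (by simp at hi'' ⊢; omega)
          simpa using this)]
      rfl

theorem pvLocate_first (k : List (List String)) (key : String) : ∀ (j i : Nat) (y0 : Int),
    pvFirstAt k key j i → pvLocate k key y0 = some ((i : Int), y0 + (j : Int)) := by
  induction k with
  | nil =>
    intro j i y0 h
    obtain ⟨hj, -⟩ := h
    simp at hj
  | cons row rest ih =>
    intro j i y0 h
    obtain ⟨hj, hi, hkey, hrows, hcols⟩ := h
    cases j with
    | zero =>
      have hrow0 : pvRowAt (row :: rest) 0 = row := by simp [pvRowAt]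
      rw [hrow0] at hi hkey hcols
      have hmem : key ∈ row := by
        rw [List.getElem?_eq_getElem hi, Option.getD_some] at hkey
        exact hkey ▸ List.getElem_mem hi
      rw [pvLocate, if_pos (by simpa using hmem),
        index?_first row key i hi hkey hcols]
      simp
    | succ j' =>
      have hnotin : key ∉ row := by
        have := hrows 0 (by simp)
        simpa [pvRowAt] using this
      rw [pvLocate, if_neg (by simpa using hnotin)]
      have hshift : pvRowAt (row :: rest) (j' + 1) = pvRowAt rest j' := by simp [pvRowAt]
      rw [hshift] at hi hkey hcols
      rw [ih j' i (y0 + 1) ⟨by simpa using hj, hi, hkey, (fun j'' hj'' => by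
        have := hrows (j'' + 1) (by simp at hj'' ⊢; omega)
        simpa [pvRowAt] using this), hcols⟩]
      have : y0 + 1 + (j' : Int) = y0 + ((j' + 1 : Nat) : Int) := by push_cast; ring
      rw [this]

theorem pvCell_natCast (k : List (List String)) (i j : Nat) (hj : j < k.length)
    (hi : i < k[j].length) : pvCell k (i : Int) (j : Int) = k[j][i] := by
  unfold pvCell
  rw [PySem.List.pyGet?_natCast k j, List.getElem?_eq_getElem hj, Option.getD_some,
    PySem.List.pyGet?_natCast k[j] i, List.getElem?_eq_getElem hi, Option.getD_some]

theorem gaps_any_iff (k : List (List String)) (x1 y1 xlo xhi ylo yhi rowY colX : Int)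
    (h0x : 0 ≤ xlo) (h0y : 0 ≤ ylo)
    (hrY1 : ylo ≤ rowY) (hrY2 : rowY ≤ yhi) (hcX1 : xlo ≤ colX) (hcX2 : colX ≤ xhi)
    (hrange : ∀ y : Int, ylo ≤ y → y ≤ yhi →
      xhi < (((PySem.List.pyGet? k y).getD []).length : Int)) :
    ((pvGaps k).any (pvOnL x1 y1 xlo xhi ylo yhi rowY colX) = true) ↔
    (∃ a b : Int, ((b = rowY ∧ xlo ≤ a ∧ a ≤ xhi) ∨ (a = colX ∧ ylo ≤ b ∧ b ≤ yhi)) ∧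
      ¬(a = x1 ∧ b = y1) ∧ pvCell k a b = " ") := by
  rw [List.any_eq_true]
  constructor
  · rintro ⟨g, hg, hon⟩
    rw [mem_pvGaps] at hg
    obtain ⟨j, i, hj, hi, hsp, rfl⟩ := hg
    unfold pvOnL at hon
    rw [decide_eq_true_eq] at hon
    obtain ⟨hgeo, hne⟩ := hon
    refine ⟨(i : Int), (j : Int), by simpa using hgeo, ?_, ?_⟩
    · intro hc
      exact hne (by simp [Prod.ext_iff]; exact ⟨hc.1, hc.2⟩)
    · rw [pvCell_natCast k i j hj hi]
      exact hsp
  · rintro ⟨a, b, hgeo, hne, hcell⟩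
    have hbounds : xlo ≤ a ∧ a ≤ xhi ∧ ylo ≤ b ∧ b ≤ yhi := by
      rcases hgeo with ⟨e, h1, h2⟩ | ⟨e, h1, h2⟩ <;> subst e <;> omega
    have hlen := hrange b hbounds.2.2.1 hbounds.2.2.2
    have hb0 : 0 ≤ b := by omega
    have ha0 : 0 ≤ a := by omega
    rw [PySem.List.pyGet?_of_nonneg k hb0] at hlen
    rcases hrow : k[b.toNat]? with _ | row
    · rw [hrow] at hlen
      simp at hlen
      omega
    · rw [hrow] at hlen
      simp only [Option.getD_some] at hlen
      have hj : b.toNat < k.length := by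
        have := List.getElem?_eq_some_iff.mp hrow
        exact this.1
      have hrow' : k[b.toNat] = row := by
        have := List.getElem?_eq_some_iff.mp hrow
        exact this.2
      have hi : a.toNat < row.length := by omega
      have hi' : a.toNat < k[b.toNat].length := by rw [hrow']; exact hi
      refine ⟨(a, b), ?_, ?_⟩
      · rw [mem_pvGaps]
        refine ⟨b.toNat, a.toNat, hj, hi', ?_, ?_⟩
        · rw [← pvCell_natCast k a.toNat b.toNat hj hi', Int.toNat_of_nonneg ha0,
            Int.toNat_of_nonneg hb0]
          exact hcell
        · rw [Int.toNat_of_nonneg ha0, Int.toNat_of_nonneg hb0]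
      · unfold pvOnL
        rw [decide_eq_true_eq]
        refine ⟨by simpa using hgeo, ?_⟩
        intro hc
        rw [Prod.ext_iff] at hc
        exact hne ⟨hc.1, hc.2⟩

theorem contains_walk_two_legs (k : List (List String)) (x y : Int) (n1 n2 : Nat)
    (c1 c2 : Char) :
    ((pvWalk k x y (List.replicate n1 c1 ++ List.replicate n2 c2)).contains " " = true) ↔
    ((∃ i : Nat, i < n1 ∧
        pvCell k (x + ((i : Int) + 1) * (pvStep 0 0 c1).1)
                 (y + ((i : Int) + 1) * (pvStep 0 0 c1).2) = " ") ∨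
     (∃ j : Nat, j < n2 ∧
        pvCell k (x + (n1 : Int) * (pvStep 0 0 c1).1 + ((j : Int) + 1) * (pvStep 0 0 c2).1)
                 (y + (n1 : Int) * (pvStep 0 0 c1).2 + ((j : Int) + 1) * (pvStep 0 0 c2).2) = " ")) := by
  rw [List.contains_iff_mem, pvWalk_append, pvDest_replicate, pvWalk_replicate, pvWalk_replicate]
  simp only [List.mem_append, List.mem_map, List.mem_range]

theorem pvStep_if_x (P : Prop) [Decidable P] :
    (pvStep 0 0 (if P then '>' else '<')).1 = (if P then (1 : Int) else -1) ∧
    (pvStep 0 0 (if P then '>' else '<')).2 = 0 := by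
  by_cases h : P <;> simp [h, pvStep]

theorem pvStep_if_y (P : Prop) [Decidable P] :
    (pvStep 0 0 (if P then 'v' else '^')).1 = 0 ∧
    (pvStep 0 0 (if P then 'v' else '^')).2 = (if P then (1 : Int) else -1) := by
  by_cases h : P <;> simp [h, pvStep]

theorem cand_ne (n1 n2 : Nat) (h1 : 0 < n1) (h2 : 0 < n2) (c1 c2 : Char) (hc : c1 ≠ c2) :
    String.ofList (List.replicate n1 c1) ++ String.ofList (List.replicate n2 c2) ≠
    String.ofList (List.replicate n2 c2) ++ String.ofList (List.replicate n1 c1) := by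
  intro heq
  have h := congrArg String.toList heq
  simp only [String.toList_append, String.toList_ofList] at h
  obtain ⟨m, rfl⟩ := Nat.exists_eq_succ_of_ne_zero (Nat.pos_iff_ne_zero.mp h1)
  obtain ⟨l, rfl⟩ := Nat.exists_eq_succ_of_ne_zero (Nat.pos_iff_ne_zero.mp h2)
  rw [List.replicate_succ, List.replicate_succ] at h
  simp only [List.cons_append, List.cons.injEq] at h
  exact hc h.1

theorem ofList_pair (a b : String) :
    PySem.Set.ofList [a, b] = if b = a then [a] else [a, b] := by
  show PySem.Set.add (PySem.Set.add PySem.Set.empty a) b = _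
  rw [PySem.Set.add, PySem.Set.add]
  by_cases h : b = a <;> simp [PySem.Set.empty, h]

-- ===== VERDICT (by name: the statement is the Claim_ definition above) =====
theorem paths_between_spec : Claim_equal_paths_between := by
  intro keypad s e _hdom hpre
  unfold Spec_paths_between
  obtain ⟨j1, hj1r, i1, hi1r, j2, hj2r, i2, hi2r, hf1, hf2, hbound⟩ := hpre
  have hp := pvLocate_first keypad s j1 i1 0 hf1
  have hq := pvLocate_first keypad e j2 i2 0 hf2
  simp only [zero_add] at hp hq
  have hrange : ∀ y : Int, min (j1 : Int) (j2 : Int) ≤ y → y ≤ max (j1 : Int) (j2 : Int) →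
      max (i1 : Int) (i2 : Int) < (((PySem.List.pyGet? keypad y).getD []).length : Int) := by
    intro y h1 h2
    have hy0 : 0 ≤ y := by omega
    have hj1l : j1 < keypad.length := hf1.1
    have hj2l : j2 < keypad.length := hf2.1
    have hylt : y.toNat < keypad.length := by omega
    have hb := hbound y.toNat (List.mem_range.mpr hylt) ⟨by omega, by omega⟩
    rw [PySem.List.pyGet?_of_nonneg keypad hy0, List.getElem?_eq_getElem hylt,
      Option.getD_some]
    have hrw : pvRowAt keypad y.toNat = keypad[y.toNat] := by
      simp [pvRowAt, List.getElem?_eq_getElem hylt]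
    rw [hrw] at hb
    omega
  set x1 : Int := (i1 : Int) with hx1
  set y1 : Int := (j1 : Int) with hy1
  set x2 : Int := (i2 : Int) with hx2
  set y2 : Int := (j2 : Int) with hy2
  have hnn1 : 0 ≤ x1 ∧ 0 ≤ y1 := ⟨by omega, by omega⟩
  have hnn2 : 0 ≤ x2 ∧ 0 ≤ y2 := ⟨by omega, by omega⟩
  unfold paths_between paths_between_alt
  rw [pvFind_eq_pvLocate, pvFind_eq_pvLocate, hp, hq]
  dsimp only
  have hhv :
      ((pvWalk keypad x1 y1
          ((String.ofList (List.replicate (x2 - x1).natAbs (if x2 > x1 then '>' else '<')) ++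
            String.ofList (List.replicate (y2 - y1).natAbs (if y2 > y1 then 'v' else '^'))).toList)).contains " ")
      = ((pvGaps keypad).any
          (pvOnL x1 y1 (min x1 x2) (max x1 x2) (min y1 y2) (max y1 y2) y1 x2)) := by
    rw [Bool.eq_iff_iff]
    rw [show ((String.ofList (List.replicate (x2 - x1).natAbs (if x2 > x1 then '>' else '<')) ++
        String.ofList (List.replicate (y2 - y1).natAbs (if y2 > y1 then 'v' else '^'))).toList) =
        List.replicate (x2 - x1).natAbs (if x2 > x1 then '>' else '<') ++
        List.replicate (y2 - y1).natAbs (if y2 > y1 then 'v' else '^') from by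
      simp [String.toList_append, String.toList_ofList]]
    rw [contains_walk_two_legs]
    rw [(pvStep_if_x (x2 > x1)).1, (pvStep_if_x (x2 > x1)).2,
      (pvStep_if_y (y2 > y1)).1, (pvStep_if_y (y2 > y1)).2]
    simp only [mul_zero, add_zero]
    rw [show x1 + ((x2 - x1).natAbs : Int) * (if x2 > x1 then 1 else -1) = x2 from by
      by_cases h : x2 > x1 <;> simp only [h, if_true, if_false] <;> omega]
    refine Iff.trans (pvLgeom (fun a b => pvCell keypad a b = " ") x1 y1 x2 y2) ?_
    exact (gaps_any_iff keypad x1 y1 (min x1 x2) (max x1 x2) (min y1 y2) (max y1 y2) y1 x2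
      (by omega) (by omega) (by omega) (by omega) (by omega) (by omega) hrange).symm
  have hvh :
      ((pvWalk keypad x1 y1
          ((String.ofList (List.replicate (y2 - y1).natAbs (if y2 > y1 then 'v' else '^')) ++
            String.ofList (List.replicate (x2 - x1).natAbs (if x2 > x1 then '>' else '<'))).toList)).contains " ")
      = ((pvGaps keypad).any
          (pvOnL x1 y1 (min x1 x2) (max x1 x2) (min y1 y2) (max y1 y2) y2 x1)) := by
    rw [Bool.eq_iff_iff]
    rw [show ((String.ofList (List.replicate (y2 - y1).natAbs (if y2 > y1 then 'v' else '^')) ++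
        String.ofList (List.replicate (x2 - x1).natAbs (if x2 > x1 then '>' else '<'))).toList) =
        List.replicate (y2 - y1).natAbs (if y2 > y1 then 'v' else '^') ++
        List.replicate (x2 - x1).natAbs (if x2 > x1 then '>' else '<') from by
      simp [String.toList_append, String.toList_ofList]]
    rw [contains_walk_two_legs]
    rw [(pvStep_if_y (y2 > y1)).1, (pvStep_if_y (y2 > y1)).2,
      (pvStep_if_x (x2 > x1)).1, (pvStep_if_x (x2 > x1)).2]
    simp only [mul_zero, add_zero]
    rw [show y1 + ((y2 - y1).natAbs : Int) * (if y2 > y1 then 1 else -1) = y2 from by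
      by_cases h : y2 > y1 <;> simp only [h, if_true, if_false] <;> omega]
    refine Iff.trans (pvLgeom (fun a b => pvCell keypad b a = " ") y1 x1 y2 x2) ?_
    rw [gaps_any_iff keypad x1 y1 (min x1 x2) (max x1 x2) (min y1 y2) (max y1 y2) y2 x1
      (by omega) (by omega) (by omega) (by omega) (by omega) (by omega) hrange]
    constructor
    · rintro ⟨a, b, hg, hne, hc⟩
      exact ⟨b, a, hg.elim (fun h => Or.inr ⟨h.1, h.2.1, h.2.2⟩)
        (fun h => Or.inl ⟨h.1, h.2.1, h.2.2⟩), fun h => hne ⟨h.2, h.1⟩, hc⟩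
    · rintro ⟨a, b, hg, hne, hc⟩
      exact ⟨b, a, hg.elim (fun h => Or.inr ⟨h.1, h.2.1, h.2.2⟩)
        (fun h => Or.inl ⟨h.1, h.2.1, h.2.2⟩), fun h => hne ⟨h.2, h.1⟩, hc⟩
  rw [ofList_pair]
  by_cases hdeg : x1 = x2 ∨ y1 = y2
  · have heq : String.ofList (List.replicate (y2 - y1).natAbs (if y2 > y1 then 'v' else '^')) ++
        String.ofList (List.replicate (x2 - x1).natAbs (if x2 > x1 then '>' else '<')) =
        String.ofList (List.replicate (x2 - x1).natAbs (if x2 > x1 then '>' else '<')) ++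
        String.ofList (List.replicate (y2 - y1).natAbs (if y2 > y1 then 'v' else '^')) := by
      rcases hdeg with h | h
      · rw [show (x2 - x1).natAbs = 0 from by omega]
        simp
      · rw [show (y2 - y1).natAbs = 0 from by omega]
        simp
    rw [if_pos heq]
    have h2f : ¬ (x1 ≠ x2 ∧ y1 ≠ y2 ∧
        (!decide ((pvGaps keypad).any
          (pvOnL x1 y1 (min x1 x2) (max x1 x2) (min y1 y2) (max y1 y2) y2 x1) = true)) = true) := by
      rintro ⟨h1', h2', -⟩
      rcases hdeg with h | h
      · exact h1' h
      · exact h2' h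
    rw [if_neg h2f]
    simp only [List.filter_cons, List.filter_nil, List.append_nil]
    rw [hhv]
    by_cases hb : (pvGaps keypad).any
        (pvOnL x1 y1 (min x1 x2) (max x1 x2) (min y1 y2) (max y1 y2) y1 x2) <;>
      simp [hb, String.append_assoc]
  · rw [not_or] at hdeg
    have hne : String.ofList (List.replicate (y2 - y1).natAbs (if y2 > y1 then 'v' else '^')) ++
        String.ofList (List.replicate (x2 - x1).natAbs (if x2 > x1 then '>' else '<')) ≠
        String.ofList (List.replicate (x2 - x1).natAbs (if x2 > x1 then '>' else '<')) ++
        String.ofList (List.replicate (y2 - y1).natAbs (if y2 > y1 then 'v' else '^')) := by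
      refine cand_ne _ _ (by omega) (by omega) _ _ ?_
      by_cases h1 : y2 > y1 <;> by_cases h2 : x2 > x1 <;> simp [h1, h2]
    rw [if_neg hne]
    simp only [List.filter_cons, List.filter_nil]
    rw [hhv, hvh]
    by_cases hb1 : (pvGaps keypad).any
        (pvOnL x1 y1 (min x1 x2) (max x1 x2) (min y1 y2) (max y1 y2) y1 x2) <;>
      by_cases hb2 : (pvGaps keypad).any
          (pvOnL x1 y1 (min x1 x2) (max x1 x2) (min y1 y2) (max y1 y2) y2 x1) <;>
      simp [hb1, hb2, hdeg.1, hdeg.2, String.append_assoc]
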